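-- pv_equiv track=rewrite | github.com/wrietersco/quran-research-software | src/db/find_verses.py | find_matching_ayahs
-- ===== SOURCE A (Python) =====
-- def find_matching_ayahs(
--     ayah_tokens: dict[tuple[int, int], list[str]],
--     parts: list[str],
-- ) -> list[tuple[int, int]]:
--     """Ayat where a contiguous subsequence of match-normalized tokens equals parts (one hit per ayah max)."""
--     if not parts:
--         return []
--     n = len(parts)
--     hits: list[tuple[int, int]] = []
--     for (su, ay), toks in ayah_tokens.items():
--         if len(toks) < n:
--             continue
--         for start in range(len(toks) - n + 1):
--             if toks[start : start + n] == parts: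
--                 hits.append((su, ay))
--                 break
--     return hits
-- ===== SOURCE B (Python) =====
-- def find_matching_ayahs(
--     ayah_tokens: dict[tuple[int, int], list[str]],
--     parts: list[str],
-- ) -> list[tuple[int, int]]:
--     """Ayat where a contiguous subsequence of match-normalized tokens equals parts (one hit per ayah max)."""
--     if not parts:
--         return []
--
--     def occurs(toks: list[str]) -> bool:
--         # walk down the suffixes of toks, comparing parts element-wise (no slicing, no indices)
--         while len(toks) >= len(parts):
--             if all(p == t for p, t in zip(parts, toks)):
--                 return True
--             toks = toks[1:]
--         return False
--
--     return [(su, ay) for (su, ay), toks in ayah_tokens.items() if occurs(toks)]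
-- ===== Notes on version B (the rewrite author's own statement) =====
-- stated objective: alternative
-- what changed: Replaces the index/range sliding window with loop-and-break and explicit list appends by a suffix-walking element-wise prefix check (zip/all over suffixes, no slicing by index) feeding a comprehension.
import Mathlib
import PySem

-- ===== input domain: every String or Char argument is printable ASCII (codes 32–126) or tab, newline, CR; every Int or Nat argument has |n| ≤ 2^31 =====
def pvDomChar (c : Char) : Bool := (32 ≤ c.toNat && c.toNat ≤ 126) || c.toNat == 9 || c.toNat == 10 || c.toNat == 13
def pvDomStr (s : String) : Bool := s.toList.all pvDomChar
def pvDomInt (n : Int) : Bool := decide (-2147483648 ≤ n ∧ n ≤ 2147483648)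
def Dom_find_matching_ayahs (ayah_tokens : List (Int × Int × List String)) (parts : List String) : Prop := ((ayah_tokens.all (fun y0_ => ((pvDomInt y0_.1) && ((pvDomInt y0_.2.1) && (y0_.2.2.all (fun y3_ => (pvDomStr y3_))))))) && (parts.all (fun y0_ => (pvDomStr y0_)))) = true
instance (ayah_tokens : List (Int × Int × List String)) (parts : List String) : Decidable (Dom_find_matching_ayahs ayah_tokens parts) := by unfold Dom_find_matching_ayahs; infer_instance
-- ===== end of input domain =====

-- B walks the suffixes of each ayah's token list with an element-wise zip/all prefix check
-- instead of A's index-range sliding window of slice comparisons; alternative decomposition, same cost.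

-- ===== PORT A =====
-- inner 'for start in range(...): if toks[start:start+n] == parts: append; break' — returns whether a match was found
def pvScanA (parts toks : List String) (n : Int) : List Int → Bool
  | [] => false
  | s :: rest =>
      if PySem.List.slice toks (some s) (some (s + n)) == parts then true
      else pvScanA parts toks n rest

def find_matching_ayahs (ayah_tokens : List (Int × Int × List String)) (parts : List String) : List (Int × Int) :=
  if parts = [] then []
  else
    let n : Int := parts.length
    ayah_tokens.foldl (fun hits e =>
      if (e.2.2.length : Int) < n then hits
      else if pvScanA parts e.2.2 n (PySem.List.pyRange 0 ((e.2.2.length : Int) - n + 1) 1) then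
        hits ++ [(e.1, e.2.1)]
      else hits) []

-- ===== PORT B =====
-- 'all(p == t for p, t in zip(parts, toks))'
def pvPrefixEq (parts toks : List String) : Bool :=
  (parts.zip toks).all (fun pt => pt.1 == pt.2)

-- 'while len(toks) >= len(parts): if <prefix>: return True; toks = toks[1:]; return False'
def pvOccurs (parts toks : List String) : Bool :=
  if toks.length < parts.length then false
  else if pvPrefixEq parts toks then true
  else pvOccurs parts (toks.drop 1)
termination_by toks.length
decreasing_by
  cases toks with
  | nil => simp [pvPrefixEq] at *
  | cons x xs => simp

def find_matching_ayahs_alt (ayah_tokens : List (Int × Int × List String)) (parts : List String) : List (Int × Int) :=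
  if parts = [] then []
  else (ayah_tokens.filter (fun e => pvOccurs parts e.2.2)).map (fun e => (e.1, e.2.1))

-- ===== PRECONDITION & SPEC =====
def Spec_find_matching_ayahs (ayah_tokens : List (Int × Int × List String)) (parts : List String) (out : List (Int × Int)) : Prop := out = find_matching_ayahs_alt ayah_tokens parts
instance (ayah_tokens : List (Int × Int × List String)) (parts : List String) (out : List (Int × Int)) : Decidable (Spec_find_matching_ayahs ayah_tokens parts out) := by unfold Spec_find_matching_ayahs; infer_instance

-- ===== CLAIM (what is proved, stated in full; the proofs are below) =====
def Claim_equal_find_matching_ayahs : Prop := ∀ (ayah_tokens : List (Int × Int × List String)) (parts : List String), Dom_find_matching_ayahs ayah_tokens parts → Spec_find_matching_ayahs ayah_tokens parts (find_matching_ayahs ayah_tokens parts)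

-- ===== LEMMAS AND PROOFS =====

theorem pvScanA_iff (parts toks : List String) (n : Int) (ss : List Int) :
    pvScanA parts toks n ss = true ↔
      ∃ s ∈ ss, PySem.List.slice toks (some s) (some (s + n)) = parts := by
  induction ss with
  | nil => simp [pvScanA]
  | cons s rest ih =>
      simp only [pvScanA]
      by_cases h : PySem.List.slice toks (some s) (some (s + n)) = parts
      · simp [h]
      · simp [h, ih]

theorem pvPrefixEq_iff (parts : List String) :
    ∀ toks : List String, parts.length ≤ toks.length →
      (pvPrefixEq parts toks = true ↔ toks.take parts.length = parts) := by
  induction parts with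
  | nil => intro toks _; simp [pvPrefixEq]
  | cons p ps ih =>
      intro toks hlen
      cases toks with
      | nil => simp at hlen
      | cons t ts =>
          have ih' := ih ts (by simp at hlen; omega)
          simp only [pvPrefixEq, List.zip_cons_cons, List.all_cons, Bool.and_eq_true, beq_iff_eq]
          rw [show ((ps.zip ts).all fun pt => pt.1 == pt.2) = pvPrefixEq ps ts from rfl, ih']
          simp only [List.length_cons, List.take_succ_cons, List.cons.injEq]
          constructor <;> rintro ⟨h1, h2⟩ <;> exact ⟨h1.symm, h2⟩

theorem pvOccurs_iff (parts : List String) :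
    ∀ toks : List String, pvOccurs parts toks = true ↔
      ∃ j : Nat, j + parts.length ≤ toks.length ∧ (toks.drop j).take parts.length = parts := by
  intro toks
  induction hn : toks.length using Nat.strong_induction_on generalizing toks with
  | _ N ih =>
    subst hn
    rw [pvOccurs]
    by_cases hlen : toks.length < parts.length
    · simp only [hlen, if_true]
      constructor
      · intro h; cases h
      · rintro ⟨j, hj, _⟩; omega
    · simp only [hlen, if_false]
      by_cases hpre : pvPrefixEq parts toks = true
      · simp only [hpre, if_true, true_iff]
        exact ⟨0, by omega, by simpa using (pvPrefixEq_iff parts toks (by omega)).mp hpre⟩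
      · rw [if_neg hpre]
        cases toks with
        | nil => exact absurd (by simp [pvPrefixEq]) hpre
        | cons t ts =>
            simp only [List.drop_one, List.tail_cons]
            rw [ih ts.length (by simp) ts rfl]
            constructor
            · rintro ⟨j, hj, hs⟩
              exact ⟨j + 1, by simp at hj ⊢; omega, by simpa using hs⟩
            · rintro ⟨j, hj, hs⟩
              cases j with
              | zero =>
                  exfalso; apply hpre
                  exact (pvPrefixEq_iff parts (t :: ts) (by omega)).mpr (by simpa using hs)
              | succ j =>
                  exact ⟨j, by simp at hj ⊢; omega, by simpa using hs⟩

-- per-ayah: A's guarded window scan equals B's suffix walk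
theorem pvElem_eq (parts toks : List String) :
    (if (toks.length : Int) < (parts.length : Int) then false
     else pvScanA parts toks (parts.length : Int)
        (PySem.List.pyRange 0 ((toks.length : Int) - (parts.length : Int) + 1) 1))
    = pvOccurs parts toks := by
  by_cases hlen : toks.length < parts.length
  · rw [if_pos (by exact_mod_cast hlen), pvOccurs, if_pos hlen]
  · rw [if_neg (by exact_mod_cast hlen)]
    rw [Bool.eq_iff_iff, pvScanA_iff, pvOccurs_iff]
    constructor
    · rintro ⟨s, hmem, hs⟩
      rw [PySem.List.mem_pyRange_one] at hmem
      refine ⟨s.toNat, by omega, ?_⟩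
      have hcast : s = ((s.toNat : Nat) : Int) := by omega
      rw [hcast, PySem.List.slice_natCast_add] at hs
      exact hs
    · rintro ⟨j, hj, hs⟩
      refine ⟨(j : Int), ?_, ?_⟩
      · rw [PySem.List.mem_pyRange_one]; omega
      · rw [PySem.List.slice_natCast_add]; exact hs

theorem find_matching_ayahs_eq (ayah_tokens : List (Int × Int × List String)) (parts : List String) :
    find_matching_ayahs ayah_tokens parts = find_matching_ayahs_alt ayah_tokens parts := by
  unfold find_matching_ayahs find_matching_ayahs_alt
  by_cases hp : parts = []
  · simp [hp]
  · simp only [hp, if_false]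
    have hbody : (fun (hits : List (Int × Int)) (e : Int × Int × List String) =>
        if (e.2.2.length : Int) < (parts.length : Int) then hits
        else if pvScanA parts e.2.2 (parts.length : Int)
            (PySem.List.pyRange 0 ((e.2.2.length : Int) - (parts.length : Int) + 1) 1) then
          hits ++ [(e.1, e.2.1)]
        else hits)
        = (fun hits e => if pvOccurs parts e.2.2 then hits ++ [(e.1, e.2.1)] else hits) := by
      funext hits e
      rw [← pvElem_eq parts e.2.2]
      by_cases h1 : (e.2.2.length : Int) < (parts.length : Int)
      · simp [h1]
      · simp [h1]
    rw [hbody, PySem.List.foldl_append_if (fun e : Int × Int × List String => pvOccurs parts e.2.2) (fun e : Int × Int × List String => (e.1, e.2.1))]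
    simp

-- ===== VERDICT (by name: the statement is the Claim_ definition above) =====
theorem find_matching_ayahs_spec : Claim_equal_find_matching_ayahs := by
  intro ayah_tokens parts _
  unfold Spec_find_matching_ayahs
  exact find_matching_ayahs_eq ayah_tokens parts
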